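-- pv_equiv track=rewrite | github.com/NotSamarth/Ai | Exp/exp3-2.py | dfs
-- ===== SOURCE A (Python) =====
-- def is_valid_state(state):
--     m, c, b = state
--     if m < 0 or c < 0 or m > 3 or c > 3:
--         return False
--     if (m > 0 and m < c) or (m < 3 and (3 - m) < (3 - c)):
--         return False
--     return True
--
-- def get_children_states(state):
--     children = []
--     actions = [(1, 0, 1), (2, 0, 1), (0, 1, 1), (0, 2, 1), (1, 1, 1)]
--     for action in actions:
--         new_state = tuple(map(sum, zip(state, action)))
--         if is_valid_state(new_state):
--             children.append(new_state)
--     return children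
--
-- def dfs(current_state, goal_state, visited, path):
--     if current_state == goal_state:
--         return True
--
--     visited.add(current_state)
--
--     children_states = get_children_states(current_state)
--     for child_state in children_states:
--         if child_state not in visited:
--             path.append(child_state)
--             if dfs(child_state, goal_state, visited, path):
--                 return True
--             path.pop()
--
--     return False
-- ===== SOURCE B (Python) =====
-- def is_valid_state(state):
--     m, c, b = state
--     if m < 0 or c < 0 or m > 3 or c > 3:
--         return False
--     if (m > 0 and m < c) or (m < 3 and (3 - m) < (3 - c)):
--         return False
--     return True
--
-- def get_children_states(state):
--     children = []
--     actions = [(1, 0, 1), (2, 0, 1), (0, 1, 1), (0, 2, 1), (1, 1, 1)]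
--     for action in actions:
--         new_state = tuple(map(sum, zip(state, action)))
--         if is_valid_state(new_state):
--             children.append(new_state)
--     return children
--
-- def dfs(current_state, goal_state, visited, path):
--     # Iterative DFS with an explicit stack of frames (state, pending-children list).
--     if current_state == goal_state:
--         return True
--     visited.add(current_state)
--     stack = [(current_state, get_children_states(current_state))]
--     while stack:
--         state, pending = stack[-1]
--         if not pending:
--             stack.pop()
--             if stack:
--                 path.pop()
--             continue
--         child = pending.pop(0)
--         if child in visited:
--             continue
--         if child == goal_state:
--             path.append(child)
--             return True
--         path.append(child)
--         visited.add(child)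
--         stack.append((child, get_children_states(child)))
--     return False
-- ===== Notes on version B (the rewrite author's own statement) =====
-- stated objective: alternative
-- what changed: A's recursive DFS is replaced by an iterative DFS driven by an explicit stack of (state, pending-children) frames, with identical child order, visited updates and path backtracking.
import Mathlib
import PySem

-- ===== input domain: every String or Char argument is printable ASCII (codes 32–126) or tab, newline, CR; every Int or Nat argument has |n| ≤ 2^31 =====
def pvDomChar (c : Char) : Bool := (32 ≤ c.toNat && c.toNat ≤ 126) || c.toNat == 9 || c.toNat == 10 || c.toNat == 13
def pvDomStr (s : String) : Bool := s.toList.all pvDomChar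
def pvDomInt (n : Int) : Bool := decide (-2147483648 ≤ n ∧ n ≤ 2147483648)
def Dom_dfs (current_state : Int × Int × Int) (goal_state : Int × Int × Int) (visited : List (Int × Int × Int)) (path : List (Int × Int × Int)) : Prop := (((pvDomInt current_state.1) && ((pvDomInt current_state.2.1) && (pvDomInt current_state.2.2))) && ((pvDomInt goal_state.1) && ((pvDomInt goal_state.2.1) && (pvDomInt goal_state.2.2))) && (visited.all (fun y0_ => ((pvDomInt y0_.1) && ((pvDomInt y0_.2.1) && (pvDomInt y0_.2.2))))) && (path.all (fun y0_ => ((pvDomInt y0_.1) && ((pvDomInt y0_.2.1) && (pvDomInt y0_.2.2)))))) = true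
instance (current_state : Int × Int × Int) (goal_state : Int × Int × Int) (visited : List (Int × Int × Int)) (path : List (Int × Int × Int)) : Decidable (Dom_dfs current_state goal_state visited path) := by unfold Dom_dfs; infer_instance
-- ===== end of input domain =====

-- B replaces A's recursive DFS by an iterative DFS over an explicit stack of (state, pending-children)
-- frames (objective: alternative decomposition, same cost). Both Pythons mutate `visited`/`path`
-- identically (checked by test); the claim proved here is about the RETURN value: the ports thread
-- `visited` internally, and `path` is write-only in both Pythons — never read — so it cannot
-- influence the return value and is not threaded.

-- ===== PORT A =====
-- is_valid_state
def validState (s : Int × Int × Int) : Bool :=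
  let m := s.1; let c := s.2.1
  if m < 0 || c < 0 || m > 3 || c > 3 then false
  else if (m > 0 && m < c) || (m < 3 && (3 - m) < (3 - c)) then false
  else true

def actionsList : List (Int × Int × Int) := [(1,0,1),(2,0,1),(0,1,1),(0,2,1),(1,1,1)]

-- tuple(map(sum, zip(state, action)))
def newStateOf (s a : Int × Int × Int) : Int × Int × Int :=
  (s.1 + a.1, s.2.1 + a.2.1, s.2.2 + a.2.2)

-- get_children_states: append new_state when valid, in action order
def childrenStates (s : Int × Int × Int) : List (Int × Int × Int) :=
  actionsList.foldl (fun acc a =>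
    let ns := newStateOf s a
    if validState ns then acc ++ [ns] else acc) []

-- termination measure for the DFS recursion: every child strictly increases m + c,
-- and a valid state has 0 ≤ m, c ≤ 3
def muSt (s : Int × Int × Int) : Nat := (8 - (s.1 + s.2.1)).toNat

theorem validState_bounds (s : Int × Int × Int) (hv : validState s = true) :
    0 ≤ s.1 ∧ s.1 ≤ 3 ∧ 0 ≤ s.2.1 ∧ s.2.1 ≤ 3 := by
  simp only [validState] at hv
  split_ifs at hv with h1 h2
  simp at h1
  omega

theorem muSt_child_lt (s : Int × Int × Int) :
    ∀ c ∈ childrenStates s, muSt c < muSt s := by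
  intro c hc
  unfold childrenStates at hc
  rw [PySem.List.foldl_append_if (fun a => validState (newStateOf s a)) (newStateOf s)] at hc
  simp only [List.nil_append, List.mem_map, List.mem_filter] at hc
  obtain ⟨a, ⟨ha, hv⟩, rfl⟩ := hc
  have hb := validState_bounds _ hv
  fin_cases ha <;> (unfold newStateOf at hb ⊢; unfold muSt; dsimp at hb ⊢; omega)

mutual
-- dfs, with the mutated `visited` set threaded through (returned alongside the Bool);
-- the proof argument `h` only justifies termination (children strictly shrink muSt)
def dfsAux (s g : Int × Int × Int) (v : PySem.Set (Int × Int × Int)) :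
    Bool × PySem.Set (Int × Int × Int) :=
  if s = g then (true, v)
  else dfsLoop s g (childrenStates s) (PySem.Set.add v s) (fun _ hc => hc)
  termination_by (muSt s, 1, 0)
  decreasing_by exact Prod.Lex.right _ (Prod.Lex.left _ _ (by omega))

-- the `for child_state in children_states` loop of dfs (early return on True)
def dfsLoop (s g : Int × Int × Int) (cs : List (Int × Int × Int))
    (v : PySem.Set (Int × Int × Int)) (h : ∀ c ∈ cs, c ∈ childrenStates s) :
    Bool × PySem.Set (Int × Int × Int) :=
  match cs with
  | [] => (false, v)
  | c :: rest =>
    if PySem.Set.contains v c then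
      dfsLoop s g rest v (fun x hx => h x (List.mem_cons_of_mem _ hx))
    else
      let r := dfsAux c g v
      if r.1 then r
      else dfsLoop s g rest r.2 (fun x hx => h x (List.mem_cons_of_mem _ hx))
  termination_by (muSt s, 0, cs.length)
  decreasing_by
  · exact Prod.Lex.right _ (Prod.Lex.right _ (by simp))
  · exact Prod.Lex.left _ _ (muSt_child_lt s c (h c List.mem_cons_self))
  · exact Prod.Lex.right _ (Prod.Lex.right _ (by simp))
end

def dfs (current_state : Int × Int × Int) (goal_state : Int × Int × Int) (visited : List (Int × Int × Int)) (path : List (Int × Int × Int)) : Bool :=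
  (dfsAux current_state goal_state visited).1

-- ===== PORT B =====
-- cost of fully exploring a state; used only as runStack's termination measure
def costF (s : Int × Int × Int) : Nat :=
  2 + ((childrenStates s).attach.map (fun c => costF c.1)).sum
  termination_by muSt s
  decreasing_by exact muSt_child_lt s c.1 c.2

theorem costF_eq (s : Int × Int × Int) :
    costF s = 2 + ((childrenStates s).map costF).sum := by
  rw [costF]
  congr 1
  rw [← List.attach_map_subtype_val (childrenStates s), List.map_map]
  simp

theorem costF_ge (s : Int × Int × Int) : 2 ≤ costF s := by
  rw [costF_eq]; omega

def stackMeasure (st : List ((Int × Int × Int) × List (Int × Int × Int))) : Nat :=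
  (st.map (fun f => 1 + (f.2.map costF).sum)).sum

-- the while-stack loop of Source B: frames hold (state, pending children);
-- exhausted frame → pop; visited child → drop it; goal child → True; else push a new frame
def runStack (g : Int × Int × Int) :
    List ((Int × Int × Int) × List (Int × Int × Int)) →
    PySem.Set (Int × Int × Int) → Bool
  | [], _ => false
  | (_, []) :: rest, v => runStack g rest v
  | (s, c :: cs) :: rest, v =>
    if PySem.Set.contains v c then runStack g ((s, cs) :: rest) v
    else if c = g then true
    else runStack g ((c, childrenStates c) :: (s, cs) :: rest) (PySem.Set.add v c)
  termination_by st _ => stackMeasure st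
  decreasing_by
  · simp [stackMeasure]
  · have := costF_ge c; simp [stackMeasure]; omega
  · have := costF_eq c; simp [stackMeasure]; omega

def dfs_alt (current_state : Int × Int × Int) (goal_state : Int × Int × Int) (visited : List (Int × Int × Int)) (path : List (Int × Int × Int)) : Bool :=
  if current_state = goal_state then true
  else runStack goal_state [(current_state, childrenStates current_state)]
        (PySem.Set.add visited current_state)

-- ===== PRECONDITION & SPEC =====
def Spec_dfs (current_state : Int × Int × Int) (goal_state : Int × Int × Int) (visited : List (Int × Int × Int)) (path : List (Int × Int × Int)) (out : Bool) : Prop := out = dfs_alt current_state goal_state visited path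
instance (current_state : Int × Int × Int) (goal_state : Int × Int × Int) (visited : List (Int × Int × Int)) (path : List (Int × Int × Int)) (out : Bool) : Decidable (Spec_dfs current_state goal_state visited path out) := by unfold Spec_dfs; infer_instance

-- ===== CLAIM (what is proved, stated in full; the proofs are below) =====
def Claim_equal_dfs : Prop := ∀ (current_state : Int × Int × Int) (goal_state : Int × Int × Int) (visited : List (Int × Int × Int)) (path : List (Int × Int × Int)), Dom_dfs current_state goal_state visited path → Spec_dfs current_state goal_state visited path (dfs current_state goal_state visited path)

-- ===== LEMMAS AND PROOFS =====
theorem runStack_nil (g : Int × Int × Int) (v : PySem.Set (Int × Int × Int)) :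
    runStack g [] v = false := by
  unfold runStack
  rfl

theorem runStack_pop (g s : Int × Int × Int) (rest : List ((Int × Int × Int) × List (Int × Int × Int)))
    (v : PySem.Set (Int × Int × Int)) :
    runStack g ((s, []) :: rest) v = runStack g rest v := by
  conv_lhs => unfold runStack

theorem runStack_cons (g s c : Int × Int × Int) (cs : List (Int × Int × Int))
    (rest : List ((Int × Int × Int) × List (Int × Int × Int))) (v : PySem.Set (Int × Int × Int)) :
    runStack g ((s, c :: cs) :: rest) v =
      (if PySem.Set.contains v c then runStack g ((s, cs) :: rest) v
       else if c = g then true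
       else runStack g ((c, childrenStates c) :: (s, cs) :: rest) (PySem.Set.add v c)) := by
  conv_lhs => unfold runStack

theorem dfsLoop_cons (s g c : Int × Int × Int) (rest' : List (Int × Int × Int))
    (v : PySem.Set (Int × Int × Int)) (h : ∀ x ∈ c :: rest', x ∈ childrenStates s) :
    dfsLoop s g (c :: rest') v h =
      (if PySem.Set.contains v c then
        dfsLoop s g rest' v (fun x hx => h x (List.mem_cons_of_mem _ hx))
       else if (dfsAux c g v).1 then dfsAux c g v
       else dfsLoop s g rest' (dfsAux c g v).2 (fun x hx => h x (List.mem_cons_of_mem _ hx))) := by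
  conv_lhs => unfold dfsLoop

-- invariant: the machine with a frame (s, cs) on top behaves like A's loop over cs, then
-- (if no success) continues with the rest of the stack and the grown visited set
theorem run_eq_loop : ∀ n s, muSt s ≤ n →
    ∀ cs (h : ∀ c ∈ cs, c ∈ childrenStates s) v g rest,
    runStack g ((s, cs) :: rest) v =
      (if (dfsLoop s g cs v h).1 then true else runStack g rest (dfsLoop s g cs v h).2) := by
  intro n
  induction n using Nat.strong_induction_on with
  | _ n IHn =>
    intro s hs cs
    induction cs with
    | nil =>
      intro h v g rest
      unfold dfsLoop
      rw [runStack_pop]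
      simp
    | cons c rest' ihr =>
      intro h v g rest
      rw [runStack_cons, dfsLoop_cons]
      by_cases hv : PySem.Set.contains v c
      · simp only [hv, if_true]
        exact ihr _ v g rest
      · simp only [hv, Bool.false_eq_true, if_false]
        by_cases hg : c = g
        · subst hg
          have hA : dfsAux c c v = (true, v) := by unfold dfsAux; simp
          simp [hA]
        · simp only [hg, if_false]
          have hmu : muSt c < muSt s := muSt_child_lt s c (h c List.mem_cons_self)
          have hA : dfsAux c g v =
              dfsLoop c g (childrenStates c) (PySem.Set.add v c) (fun _ hc => hc) := by
            unfold dfsAux; simp [hg]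
          rw [IHn (muSt c) (lt_of_lt_of_le hmu hs) c le_rfl (childrenStates c)
              (fun _ hc => hc) (PySem.Set.add v c) g ((s, rest') :: rest)]
          rw [← hA]
          by_cases hr : (dfsAux c g v).1
          · simp [hr]
          · simp only [hr, Bool.false_eq_true, if_false]
            exact ihr _ (dfsAux c g v).2 g rest

-- ===== VERDICT (by name: the statement is the Claim_ definition above) =====
theorem dfs_spec : Claim_equal_dfs := by
  intro s g v p _
  unfold Spec_dfs dfs dfs_alt
  by_cases hg : s = g
  · subst hg; unfold dfsAux; simp
  · simp only [hg, if_false]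
    conv_lhs => unfold dfsAux
    simp only [hg, if_false]
    rw [run_eq_loop (muSt s) s le_rfl (childrenStates s) (fun _ hc => hc)
        (PySem.Set.add v s) g []]
    cases hr : (dfsLoop s g (childrenStates s) (PySem.Set.add v s) (fun _ hc => hc)).1
    · simp [runStack_nil]
    · simp
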